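-- pv_equiv track=rewrite | github.com/jajreidy/pulp-tool | pulp_tool/cli/search_by_checksum.py | _collect_checksums
-- ===== SOURCE A (Python) =====
-- from typing import Any, Dict, List, Optional, Set
--
-- def _collect_checksums(checksum: tuple[str, ...], checksums: Optional[str]) -> List[str]:
--     """Collect and deduplicate checksums from --checksum and --checksums options."""
--     result: List[str] = []
--     seen: set[str] = set()
--     for c in checksum:
--         c_stripped = c.strip().lower()
--         if c_stripped and c_stripped not in seen:
--             result.append(c_stripped)
--             seen.add(c_stripped)
--     if checksums:
--         for c in checksums.split(","):
--             c_stripped = c.strip().lower()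
--             if c_stripped and c_stripped not in seen:
--                 result.append(c_stripped)
--                 seen.add(c_stripped)
--     return result
-- ===== SOURCE B (Python) =====
-- from typing import List, Optional
--
-- def _collect_checksums(checksum: tuple, checksums: Optional[str]) -> List[str]:
--     """Collect and deduplicate checksums from --checksum and --checksums options."""
--     items = [c.strip().lower() for c in checksum]
--     if checksums:
--         items += [c.strip().lower() for c in checksums.split(",")]
--     items = [c for c in items if c]
--     # overwrite while scanning backwards: each value ends up mapped to its FIRST position
--     first = {}
--     for i, c in reversed(list(enumerate(items))):
--         first[c] = i
--     # recover first-occurrence order numerically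
--     return [c for c, _ in sorted(first.items(), key=lambda kv: kv[1])]
-- ===== Notes on version B (the rewrite author's own statement) =====
-- stated objective: alternative
-- what changed: B replaces A's interleaved seen-set loop by a stateless pipeline: normalize both sources, filter empties, then dedup without any membership test by scanning the list backwards into a dict (overwrite leaves each value's first index) and sorting the entries by that index to recover first-occurrence order.
import Mathlib
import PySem

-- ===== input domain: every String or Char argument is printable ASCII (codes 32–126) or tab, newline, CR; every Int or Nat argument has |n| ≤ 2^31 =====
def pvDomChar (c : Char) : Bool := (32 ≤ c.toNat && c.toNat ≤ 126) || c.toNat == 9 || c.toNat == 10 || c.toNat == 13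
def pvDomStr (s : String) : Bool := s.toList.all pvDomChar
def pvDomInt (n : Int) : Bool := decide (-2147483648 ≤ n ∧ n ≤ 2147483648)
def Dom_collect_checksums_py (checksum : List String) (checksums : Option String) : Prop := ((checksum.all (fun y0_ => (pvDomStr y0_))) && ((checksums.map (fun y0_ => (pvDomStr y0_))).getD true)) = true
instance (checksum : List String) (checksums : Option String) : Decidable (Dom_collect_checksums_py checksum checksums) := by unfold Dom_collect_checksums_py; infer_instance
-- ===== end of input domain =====

-- B replaces A's interleaved seen-set loop by a stateless pipeline: normalize, filter empties,
-- then dedup via a backwards overwrite-scan into a dict of first positions plus a sort by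
-- position; objective: alternative.


-- ===== PORT A =====
-- c.strip().lower()
def pvNorm (c : String) : String := PySem.Str.lower (PySem.Str.strip c)

-- one iteration of A's loop body, over state (result, seen)
def pvStepA (st : List String × PySem.Set String) (c : String) : List String × PySem.Set String :=
  let c_stripped := pvNorm c
  if c_stripped ≠ "" ∧ ¬ (PySem.Set.contains st.2 c_stripped) then
    (st.1 ++ [c_stripped], PySem.Set.add st.2 c_stripped)
  else st

def collect_checksums_py (checksum : List String) (checksums : Option String) : List String :=
  let st := checksum.foldl pvStepA ([], PySem.Set.empty)
  let st' :=
    match checksums with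
    | some s => if s ≠ "" then ((PySem.Str.split? s ",").getD []).foldl pvStepA st else st
    | none => st
  st'.1

-- ===== PORT B =====
def collect_checksums_py_alt (checksum : List String) (checksums : Option String) : List String :=
  let items := checksum.map (fun c => PySem.Str.lower (PySem.Str.strip c))
  let items' :=
    match checksums with
    | some s =>
        if s ≠ "" then
          items ++ ((PySem.Str.split? s ",").getD []).map (fun c => PySem.Str.lower (PySem.Str.strip c))
        else items
    | none => items
  let items'' := items'.filter (fun c => c ≠ "")
  -- for i, c in reversed(list(enumerate(items))): first[c] = i
  let first := ((PySem.List.enumerate items'').reverse).foldl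
    (fun (d : PySem.Dict String Int) (p : Int × String) => d.insert p.2 p.1) PySem.Dict.empty
  -- [c for c, _ in sorted(first.items(), key=lambda kv: kv[1])]
  (PySem.List.sorted first.items (fun kv => kv.2) false).map (fun kv => kv.1)

-- ===== PRECONDITION & SPEC =====
def Spec_collect_checksums_py (checksum : List String) (checksums : Option String) (out : List String) : Prop := out = collect_checksums_py_alt checksum checksums
instance (checksum : List String) (checksums : Option String) (out : List String) : Decidable (Spec_collect_checksums_py checksum checksums out) := by unfold Spec_collect_checksums_py; infer_instance

-- ===== CLAIM (what is proved, stated in full; the proofs are below) =====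
def Claim_equal_collect_checksums_py : Prop := ∀ (checksum : List String) (checksums : Option String), Dom_collect_checksums_py checksum checksums → Spec_collect_checksums_py checksum checksums (collect_checksums_py checksum checksums)

-- ===== LEMMAS AND PROOFS =====

-- A's loop keeps the invariant result = seen (as lists); starting from a state (s, s)
-- it performs exactly Set.update with the nonempty normalized strings of its input.
theorem pvLoopA_eq (l : List String) (s : List String) :
    l.foldl pvStepA (s, s) =
      (PySem.Set.update s ((l.map pvNorm).filter (fun c => c ≠ "")),
       PySem.Set.update s ((l.map pvNorm).filter (fun c => c ≠ ""))) := by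
  induction l generalizing s with
  | nil => simp [PySem.Set.update]
  | cons c rest ih =>
    by_cases h0 : pvNorm c = ""
    · simpa [pvStepA, h0, PySem.Set.update] using ih s
    · by_cases h1 : pvNorm c ∈ s
      · have hadd : PySem.Set.add s (pvNorm c) = s := by simp [PySem.Set.add, PySem.Set.contains, h1]
        simpa [pvStepA, PySem.Set.contains, h0, h1, PySem.Set.update, hadd] using ih s
      · have hadd : PySem.Set.add s (pvNorm c) = s ++ [pvNorm c] := by
          simp [PySem.Set.add, PySem.Set.contains, h1]
        simpa [pvStepA, PySem.Set.contains, h0, h1, PySem.Set.update, hadd] using ih (s ++ [pvNorm c])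

-- A's seen-set fold from empty is Python's ordered dedup
theorem pvUpdate_nil_eq_dedup (ys : List String) :
    PySem.Set.update [] ys = PySem.List.dedup ys := by
  simp [PySem.List.dedup_eq_ofList, PySem.Set.ofList, PySem.Set.update]

-- B's dict: shorthand for the backwards overwrite fold
def pvDictOf (ys : List String) : PySem.Dict String Int :=
  ((PySem.List.enumerate ys).reverse).foldl
    (fun (d : PySem.Dict String Int) (p : Int × String) => d.insert p.2 p.1) PySem.Dict.empty

-- a fold of inserts looks up as a find? over the reversed pair list
theorem pvGet_fold (l : List (Int × String)) (d : PySem.Dict String Int) (v : String) :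
    ((l.foldl (fun (d : PySem.Dict String Int) (p : Int × String) => d.insert p.2 p.1) d).get? v) =
      match l.reverse.find? (fun p => p.2 == v) with
      | some p => some p.1
      | none => d.get? v := by
  induction l generalizing d with
  | nil => simp
  | cons p l' ih =>
    rw [List.foldl_cons, ih, List.reverse_cons, List.find?_append]
    cases hf : l'.reverse.find? (fun q => q.2 == v) with
    | some q => simp
    | none =>
      by_cases hp : p.2 = v
      · simp [hp]
      · simp [hp, PySem.Dict.get?_insert, Ne.symm hp]

-- find? over enumerate returns the first occurrence with its absolute index
theorem pvFind_enum (ys : List String) (s : Int) (v : String) :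
    (PySem.List.enumerate ys s).find? (fun p => p.2 == v) =
      if v ∈ ys then some (s + (ys.idxOf v : Int), v) else none := by
  induction ys generalizing s with
  | nil => simp [PySem.List.enumerate]
  | cons y t ih =>
    rw [PySem.List.enumerate_cons]
    by_cases h : y = v
    · subst h
      simp [List.idxOf_cons_self]
    · rw [List.find?_cons_of_neg (by simpa using h), ih]
      by_cases hm : v ∈ t
      · have hidx := List.idxOf_cons_ne t h
        simp only [hm, if_true, List.mem_cons, Ne.symm h, false_or, hidx, Nat.succ_eq_add_one]
        congr 2
        push_cast
        ring
      · have : ¬ v ∈ (y :: t) := by simp [hm, Ne.symm h]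
        simp [hm, this]

-- lookup in B's dict = first index
theorem pvGet_dictOf (ys : List String) (v : String) :
    (pvDictOf ys).get? v = if v ∈ ys then some ((ys.idxOf v : Int)) else none := by
  unfold pvDictOf
  rw [pvGet_fold, List.reverse_reverse, pvFind_enum ys 0 v]
  by_cases hm : v ∈ ys <;> simp [hm]

theorem pvKeys_nodup (ys : List String) : (pvDictOf ys).keys.Nodup := by
  unfold pvDictOf
  exact PySem.Dict.nodup_keys_foldl_insert_key ((PySem.List.enumerate ys).reverse)
    (fun p : Int × String => p.2) (fun (_ : PySem.Dict String Int) (p : Int × String) => p.1)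
    PySem.Dict.empty PySem.Dict.nodup_keys_empty

-- the sort target: dedup ys paired with the (strictly increasing) first indices
def pvWs (ys : List String) : List (String × Int) :=
  (PySem.List.dedup ys).map (fun v => (v, (ys.idxOf v : Int)))

theorem pvWs_perm (ys : List String) : (pvWs ys).Perm (pvDictOf ys).items := by
  have hinj : Function.Injective (fun v : String => (v, (ys.idxOf v : Int))) :=
    fun a b h => congrArg Prod.fst h
  have hik : Function.Injective (fun k : String => (k, (pvDictOf ys).getD k 0)) :=
    fun a b h => congrArg Prod.fst h
  have hnd1 : (pvWs ys).Nodup := (PySem.List.nodup_dedup ys).map hinj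
  have hnd2 : (pvDictOf ys).items.Nodup := by
    rw [PySem.Dict.items_eq_map_keys _ (pvKeys_nodup ys) 0]
    exact (pvKeys_nodup ys).map hik
  rw [List.perm_ext_iff_of_nodup hnd1 hnd2]
  rintro ⟨k, w⟩
  rw [← PySem.Dict.get?_eq_some_iff_mem_items _ _ _ (pvKeys_nodup ys), pvGet_dictOf]
  constructor
  · intro hmem
    obtain ⟨v, hv, he⟩ := List.mem_map.mp hmem
    injection he with h1 h2
    subst h1
    subst h2
    rw [if_pos ((PySem.List.mem_dedup ys v).mp hv)]
  · intro hg
    by_cases hm : k ∈ ys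
    · rw [if_pos hm] at hg
      injection hg with hw
      subst hw
      exact List.mem_map.mpr ⟨k, (PySem.List.mem_dedup ys k).mpr hm, rfl⟩
    · rw [if_neg hm] at hg
      exact absurd hg (by simp)

-- removing other elements by a filter preserves the order of first occurrences
theorem pvIdx_filter_lt (p : String → Bool) (t : List String) (a b : String)
    (ha : a ∈ t.filter p) (hb : b ∈ t.filter p)
    (h : (t.filter p).idxOf a < (t.filter p).idxOf b) : t.idxOf a < t.idxOf b := by
  induction t with
  | nil => simp at ha
  | cons x t' ih =>
    by_cases hpx : p x
    · rw [List.filter_cons_of_pos hpx] at ha hb h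
      by_cases hax : a = x
      · subst hax
        have hba : b ≠ a := by
          intro hba; subst hba; simp at h
        rw [List.idxOf_cons_self, List.idxOf_cons_ne _ (Ne.symm hba)]
        omega
      · have hbx : b ≠ x := by
          intro hbx; subst hbx
          rw [List.idxOf_cons_self, List.idxOf_cons_ne _ (Ne.symm hax)] at h
          omega
        rw [List.idxOf_cons_ne _ (Ne.symm hax), List.idxOf_cons_ne _ (Ne.symm hbx)] at h ⊢
        have ha' : a ∈ t'.filter p := (List.mem_cons.mp ha).resolve_left hax
        have hb' : b ∈ t'.filter p := (List.mem_cons.mp hb).resolve_left hbx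
        have := ih ha' hb' (by omega)
        omega
    · rw [List.filter_cons_of_neg hpx] at ha hb h
      have hax : a ≠ x := by
        intro e; subst e; exact hpx (List.mem_filter.mp ha).2
      have hbx : b ≠ x := by
        intro e; subst e; exact hpx (List.mem_filter.mp hb).2
      rw [List.idxOf_cons_ne _ (Ne.symm hax), List.idxOf_cons_ne _ (Ne.symm hbx)]
      have := ih ha hb h
      omega

-- proof-side view of the ordered dedup: keep the head, delete its later copies, recurse
def pvFirstOcc : List String → List String
  | [] => []
  | h :: t => h :: pvFirstOcc (t.filter (fun x => x ≠ h))
termination_by xs => xs.length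
decreasing_by
  simp only [List.length_unattach, List.length_cons]
  exact Nat.lt_succ_of_le (le_trans (List.length_filter_le _ _) (by simp))

theorem pvUpdate_eq_firstOcc (ys : List String) (s : List String) :
    PySem.Set.update s ys = s ++ pvFirstOcc (ys.filter (fun x => ¬ x ∈ s)) := by
  induction ys generalizing s with
  | nil => simp [PySem.Set.update]; rw [pvFirstOcc.eq_1]
  | cons y t ih =>
    by_cases hy : y ∈ s
    · have hadd : PySem.Set.add s y = s := by simp [PySem.Set.add, PySem.Set.contains, hy]
      simpa [PySem.Set.update, hadd, hy] using ih s
    · have hadd : PySem.Set.add s y = s ++ [y] := by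
        simp [PySem.Set.add, PySem.Set.contains, hy]
      have h2 : t.filter (fun x => ¬ x ∈ (s ++ [y])) =
          (t.filter (fun x => ¬ x ∈ s)).filter (fun x => x ≠ y) := by
        rw [List.filter_filter]
        apply List.filter_congr
        intro x _
        by_cases hx : x = y <;> by_cases hxs : x ∈ s <;> simp [hx, hxs]
      have hih := ih (s ++ [y])
      rw [h2] at hih
      simp only [PySem.Set.update] at hih ⊢
      rw [List.foldl_cons, hadd, hih]
      rw [List.filter_cons_of_pos (by simp [hy])]
      rw [pvFirstOcc.eq_2]
      simp

theorem pvFirstOcc_eq_dedup (ys : List String) : pvFirstOcc ys = PySem.List.dedup ys := by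
  rw [← pvUpdate_nil_eq_dedup]
  simpa using (pvUpdate_eq_firstOcc ys []).symm

-- first-occurrence indices strictly increase along the ordered dedup
theorem pvFirstOcc_idx_aux (n : Nat) : ∀ (ys : List String), ys.length ≤ n →
    (pvFirstOcc ys).Pairwise (fun a b => ys.idxOf a < ys.idxOf b) := by
  induction n with
  | zero =>
    intro ys h
    have : ys = [] := List.eq_nil_of_length_eq_zero (Nat.le_zero.mp h)
    subst this
    rw [pvFirstOcc.eq_1]
    exact List.Pairwise.nil
  | succ n ihn =>
    intro ys h
    cases ys with
    | nil => rw [pvFirstOcc.eq_1]; exact List.Pairwise.nil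
    | cons y t =>
    have ih := ihn (t.filter (fun x => x ≠ y))
      (le_trans (List.length_filter_le _ _) (by simpa using h))
    rw [pvFirstOcc.eq_2]
    refine List.pairwise_cons.mpr ⟨?_, ?_⟩
    · intro b hb
      have hb' : b ∈ t.filter (fun x => x ≠ y) := by
        rw [pvFirstOcc_eq_dedup] at hb
        exact (PySem.List.mem_dedup _ b).mp hb
      have hbne : b ≠ y := by simpa using (List.mem_filter.mp hb').2
      rw [List.idxOf_cons_self, List.idxOf_cons_ne _ (Ne.symm hbne)]
      omega
    · refine List.Pairwise.imp_of_mem ?_ ih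
      intro a b hma hmb hr
      have ha' : a ∈ t.filter (fun x => x ≠ y) := by
        rw [pvFirstOcc_eq_dedup] at hma
        exact (PySem.List.mem_dedup _ a).mp hma
      have hb' : b ∈ t.filter (fun x => x ≠ y) := by
        rw [pvFirstOcc_eq_dedup] at hmb
        exact (PySem.List.mem_dedup _ b).mp hmb
      have hane : a ≠ y := by simpa using (List.mem_filter.mp ha').2
      have hbne : b ≠ y := by simpa using (List.mem_filter.mp hb').2
      have := pvIdx_filter_lt _ t a b ha' hb' hr
      rw [List.idxOf_cons_ne _ (Ne.symm hane), List.idxOf_cons_ne _ (Ne.symm hbne)]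
      omega

theorem pvFirstOcc_idx (ys : List String) :
    (pvFirstOcc ys).Pairwise (fun a b => ys.idxOf a < ys.idxOf b) :=
  pvFirstOcc_idx_aux ys.length ys le_rfl

theorem pvWs_pairwise (ys : List String) :
    (pvWs ys).Pairwise (fun a b => a.2 < b.2) := by
  rw [pvWs, List.pairwise_map]
  have h := pvFirstOcc_eq_dedup ys ▸ pvFirstOcc_idx ys
  exact h.imp (fun hab => by simp only []; exact_mod_cast hab)

-- main lemma: B's sort-by-first-index pipeline equals A's seen-set fold
theorem pvMain (ys : List String) :
    (PySem.List.sorted (pvDictOf ys).items (fun kv => kv.2) false).map (fun kv => kv.1) =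
      PySem.Set.update [] ys := by
  have hs := PySem.List.sorted_eq_of_perm_of_pairwise_lt (pvDictOf ys).items (pvWs ys)
    (fun kv => kv.2) (pvWs_perm ys) (pvWs_pairwise ys)
  rw [hs, pvUpdate_nil_eq_dedup, pvWs, List.map_map]
  have : ((fun kv : String × Int => kv.1) ∘ fun v : String => (v, (ys.idxOf v : Int))) = id := rfl
  rw [this, List.map_id]

-- ===== VERDICT (by name: the statement is the Claim_ definition above) =====
theorem collect_checksums_py_spec : Claim_equal_collect_checksums_py := by
  intro checksum checksums _
  unfold Spec_collect_checksums_py collect_checksums_py collect_checksums_py_alt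
  have h1 := pvLoopA_eq checksum []
  cases checksums with
  | none =>
      simp only [PySem.Set.empty, h1]
      rw [← pvMain]
      rfl
  | some s =>
      by_cases hs : s = ""
      · simp only [PySem.Set.empty, hs, ne_eq, not_true_eq_false, ite_false, h1]
        rw [← pvMain]
        rfl
      · have h2 := pvLoopA_eq ((PySem.Str.split? s ",").getD [])
          (PySem.Set.update [] ((checksum.map pvNorm).filter (fun c => c ≠ "")))
        simp only [PySem.Set.empty, hs, ne_eq, not_false_iff, ite_true, h1, h2]
        rw [show PySem.Set.update (PySem.Set.update [] ((checksum.map pvNorm).filter (fun c => c ≠ "")))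
              ((((PySem.Str.split? s ",").getD []).map pvNorm).filter (fun c => c ≠ "")) =
            PySem.Set.update []
              (((checksum.map pvNorm).filter (fun c => c ≠ "")) ++
               ((((PySem.Str.split? s ",").getD []).map pvNorm).filter (fun c => c ≠ ""))) by
          simp [PySem.Set.update, List.foldl_append]]
        rw [← pvMain]
        rw [show ((checksum.map pvNorm).filter (fun c => c ≠ "")) ++
              ((((PySem.Str.split? s ",").getD []).map pvNorm).filter (fun c => c ≠ "")) =
            ((checksum.map pvNorm ++ ((PySem.Str.split? s ",").getD []).map pvNorm).filter (fun c => c ≠ "")) by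
          rw [List.filter_append]]
        rfl
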